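-- pv_equiv track=rewrite | github.com/USC-NSL/Lemur | src/util/nfcp_utils.py | lib_combiner_merge_list
-- ===== SOURCE A (Python) =====
-- def lib_combiner_merge_list(input_all_lists):
-- 	"""
-- 	Goal: Generate a final list, so that every elements in the res_list contains
-- 	the following feature.
-- 	For a, b in res_list (where idx(a) < idx(b)), if a, b exist in a input_list
-- 	then in the specific list, idx(a) < idx(b) still holds.
-- 	Input: input_all_lists (type=list)
-- 	Output: res_list (type=list)
-- 	"""
-- 	res_list = []
-- 	for curr_list in input_all_lists: # merge a single list
-- 		curr_pos = 0
-- 		for curr_head in curr_list: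
-- 			if curr_head not in res_list:
-- 				res_list.insert(curr_pos, curr_head)
-- 				curr_pos += 1
-- 			else:
-- 				curr_pos = res_list.index(curr_head)
-- 	return res_list
-- ===== SOURCE B (Python) =====
-- def lib_combiner_merge_list(input_all_lists):
--     # Zipper: res == pre + suf, with the insertion cursor at the boundary.
--     # Membership is a set lookup, a new element is an append to pre; only a
--     # hit on an already-merged element re-splits the list at it.
--     pre, suf = [], []
--     seen = set()
--     for curr_list in input_all_lists:
--         suf = pre + suf     # rewind cursor to position 0
--         pre = []
--         for x in curr_list:
--             if x not in seen:
--                 seen.add(x)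
--                 pre.append(x)           # insert at cursor, cursor moves past it
--             else:
--                 whole = pre + suf       # jump cursor to the hit element
--                 i = whole.index(x)
--                 pre, suf = whole[:i], whole[i:]
--     return pre + suf
-- ===== Notes on version B (the rewrite author's own statement) =====
-- stated objective: alternative
-- what changed: Replaces the flat result list with integer cursor (list membership test, list.insert and list.index on every element) by a zipper (pre, suf) with the cursor at the boundary plus a seen-set: membership is a set lookup, a new element is an append to pre, and only a hit on an already-merged element re-splits the list at it.
import Mathlib
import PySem

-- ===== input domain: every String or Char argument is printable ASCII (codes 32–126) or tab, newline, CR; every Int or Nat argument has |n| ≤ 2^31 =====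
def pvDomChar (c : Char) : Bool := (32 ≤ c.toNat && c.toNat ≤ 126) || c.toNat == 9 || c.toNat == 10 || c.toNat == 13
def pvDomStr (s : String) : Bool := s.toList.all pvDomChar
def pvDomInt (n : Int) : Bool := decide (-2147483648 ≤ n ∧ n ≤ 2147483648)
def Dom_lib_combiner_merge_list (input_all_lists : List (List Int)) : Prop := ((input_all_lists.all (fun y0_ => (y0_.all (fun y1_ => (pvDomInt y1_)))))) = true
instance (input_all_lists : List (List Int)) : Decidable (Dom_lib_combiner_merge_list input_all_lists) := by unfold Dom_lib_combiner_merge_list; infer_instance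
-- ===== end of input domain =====

-- B replaces A's flat result list with integer cursor (list membership/insert/index on
-- every element) by a zipper (pre, suf) with the cursor at the boundary plus a seen-set;
-- proved to return the same list on every input.


-- ===== PORT A =====
-- inner loop body: state = (res_list, curr_pos)
def pvAStep (st : List Int × Int) (curr_head : Int) : List Int × Int :=
  if curr_head ∉ st.1 then
    (PySem.List.insert st.1 st.2 curr_head, st.2 + 1)
  else
    (st.1, (((PySem.List.index? st.1 curr_head).getD 0 : Nat) : Int))

def pvAList (res : List Int) (curr_list : List Int) : List Int :=
  (curr_list.foldl pvAStep (res, 0)).1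

def lib_combiner_merge_list (input_all_lists : List (List Int)) : List Int :=
  input_all_lists.foldl pvAList []

-- ===== PORT B =====
-- inner loop body: state = (pre, suf, seen); res == pre ++ suf, cursor at the boundary
def pvBStep (st : List Int × List Int × PySem.Set Int) (x : Int) :
    List Int × List Int × PySem.Set Int :=
  if ¬ PySem.Set.contains st.2.2 x then
    (st.1 ++ [x], st.2.1, PySem.Set.add st.2.2 x)
  else
    let whole := st.1 ++ st.2.1
    let i := (PySem.List.index? whole x).getD 0
    (whole.take i, whole.drop i, st.2.2)

def pvBList (st : List Int × List Int × PySem.Set Int) (curr_list : List Int) :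
    List Int × List Int × PySem.Set Int :=
  curr_list.foldl pvBStep ([], st.1 ++ st.2.1, st.2.2)

def lib_combiner_merge_list_alt (input_all_lists : List (List Int)) : List Int :=
  let st := input_all_lists.foldl pvBList ([], [], PySem.Set.empty)
  st.1 ++ st.2.1

-- ===== PRECONDITION & SPEC =====
def Spec_lib_combiner_merge_list (input_all_lists : List (List Int)) (out : List Int) : Prop := out = lib_combiner_merge_list_alt input_all_lists
instance (input_all_lists : List (List Int)) (out : List Int) : Decidable (Spec_lib_combiner_merge_list input_all_lists out) := by unfold Spec_lib_combiner_merge_list; infer_instance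

-- ===== CLAIM (what is proved, stated in full; the proofs are below) =====
def Claim_equal_lib_combiner_merge_list : Prop := ∀ (input_all_lists : List (List Int)), Dom_lib_combiner_merge_list input_all_lists → Spec_lib_combiner_merge_list input_all_lists (lib_combiner_merge_list input_all_lists)

-- ===== LEMMAS AND PROOFS =====

-- the coupling invariant between A's state (res, pos) and B's state (pre, suf, seen)
def pvRel (a : List Int × Int) (b : List Int × List Int × PySem.Set Int) : Prop :=
  a.1 = b.1 ++ b.2.1 ∧ a.2 = (b.1.length : Int) ∧ ∀ y : Int, (y ∈ b.2.2 ↔ y ∈ a.1)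

theorem pv_insert_natCast (xs : List Int) (n : Nat) (h : n ≤ xs.length) (x : Int) :
    PySem.List.insert xs (n : Int) x = xs.take n ++ x :: xs.drop n := by
  simp only [PySem.List.insert, PySem.List.sliceIndices]
  rw [if_neg (by omega : ¬ ((n:Int) < 0)), if_neg (by omega : ¬ ((1:Int) < 0))]
  have hm : (min (n:Int) (xs.length:Int)).toNat = n := by omega
  rw [hm]

theorem pvStep_rel (a : List Int × Int) (b : List Int × List Int × PySem.Set Int)
    (hr : pvRel a b) (x : Int) : pvRel (pvAStep a x) (pvBStep b x) := by
  obtain ⟨h1, h2, h3⟩ := hr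
  have hmem : PySem.Set.contains b.2.2 x = true ↔ x ∈ a.1 := by
    simpa [PySem.Set.contains] using h3 x
  by_cases hx : x ∈ a.1
  · -- hit: both re-split at the first occurrence of x
    have hcT : PySem.Set.contains b.2.2 x = true := hmem.mpr hx
    obtain ⟨k, hk⟩ := Option.isSome_iff_exists.mp
      ((PySem.List.index?_isSome_iff a.1 x).mpr hx)
    obtain ⟨hklt, -, -⟩ := PySem.List.getElem_of_index?_eq_some hk
    simp only [pvAStep, pvBStep, if_neg (not_not.mpr hx), if_neg (not_not.mpr hcT),
      ← h1, hk, Option.getD_some]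
    refine ⟨(List.take_append_drop k a.1).symm, ?_, fun y => h3 y⟩
    simp [List.length_take, Nat.le_of_lt hklt]
  · -- new element: A inserts at the cursor, B appends to pre
    have hcF : ¬ PySem.Set.contains b.2.2 x = true := fun h => hx (hmem.mp h)
    simp only [pvAStep, pvBStep, if_pos hx, if_pos hcF]
    have hins : PySem.List.insert a.1 a.2 x = b.1 ++ x :: b.2.1 := by
      rw [h2, pv_insert_natCast _ _ (by simp [h1]) x, h1,
        List.take_left' rfl, List.drop_left' rfl]
    refine ⟨by simpa using hins, by simp [h2], ?_⟩
    intro y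
    rw [hins]
    constructor
    · intro hy
      rcases (PySem.Set.mem_add b.2.2 x y).mp hy with hy' | hy'
      · have h' := (h3 y).mp hy'
        rw [h1] at h'
        simp at h' ⊢
        tauto
      · simp [hy']
    · intro hy
      apply (PySem.Set.mem_add b.2.2 x y).mpr
      rw [h1] at h3
      simp at hy
      rcases hy with h' | h' | h'
      · exact Or.inl ((h3 y).mpr (by simp [h']))
      · exact Or.inr h'
      · exact Or.inl ((h3 y).mpr (by simp [h']))

theorem pvList_rel (res : List Int) (b : List Int × List Int × PySem.Set Int)
    (hr : pvRel (res, 0) ( [], b.1 ++ b.2.1, b.2.2)) (l : List Int) :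
    pvRel (l.foldl pvAStep (res, 0)) (pvBList b l) := by
  unfold pvBList
  generalize hA : (res, (0 : Int)) = a0 at hr
  generalize hB : (([] : List Int), b.1 ++ b.2.1, b.2.2) = b0 at hr
  clear hA hB
  induction l generalizing a0 b0 with
  | nil => exact hr
  | cons x t ih => exact ih _ _ (pvStep_rel _ _ hr x)

-- the invariant carried between outer-loop iterations (cursor reset, so only res matters)
def pvRel0 (res : List Int) (b : List Int × List Int × PySem.Set Int) : Prop :=
  res = b.1 ++ b.2.1 ∧ ∀ y : Int, (y ∈ b.2.2 ↔ y ∈ res)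

theorem pvFold_rel (ls : List (List Int)) (res : List Int)
    (b : List Int × List Int × PySem.Set Int) (hr : pvRel0 res b) :
    pvRel0 (ls.foldl pvAList res) (ls.foldl pvBList b) := by
  induction ls generalizing res b with
  | nil => exact hr
  | cons l t ih =>
    simp only [List.foldl_cons]
    apply ih
    have h := pvList_rel res b ⟨by simpa using hr.1, by simp, fun y => hr.2 y⟩ l
    exact ⟨h.1, fun y => h.2.2 y⟩

-- ===== VERDICT (by name: the statement is the Claim_ definition above) =====
theorem lib_combiner_merge_list_spec : Claim_equal_lib_combiner_merge_list := by
  intro ls _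
  unfold Spec_lib_combiner_merge_list lib_combiner_merge_list lib_combiner_merge_list_alt
  exact (pvFold_rel ls [] ([], [], PySem.Set.empty) ⟨rfl, by simp [PySem.Set.empty]⟩).1
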